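-- pv_equiv track=rewrite | github.com/mehranredrose/2048 | 2048 AI AGENT/matrix_functions.py | generic_stack
-- ===== SOURCE A (Python) =====
-- def generic_stack(matrix):
--     temp_matrix = [[0] * 4 for _ in range(4)]
--     for i in range(4):
--         fill_position = 0
--         for j in range(4):
--             if matrix[i][j] != 0:
--                 temp_matrix[i][fill_position] = matrix[i][j]
--                 fill_position += 1
--     return temp_matrix
-- ===== SOURCE B (Python) =====
-- def generic_stack(matrix):
--     # Read the 4x4 grid; a stable sort with key (x == 0) pushes zeros to the
--     # right while keeping nonzero tiles in their original order.
--     return [sorted((matrix[i][j] for j in range(4)), key=lambda x: x == 0)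
--             for i in range(4)]
-- ===== Notes on version B (the rewrite author's own statement) =====
-- stated objective: idiomatic
-- what changed: Replaces A's preallocated 4x4 temp matrix with cursor-indexed writes by a per-row stable sort (key = x == 0) that pushes zeros right, in a comprehension over the first four rows.
import Mathlib
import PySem

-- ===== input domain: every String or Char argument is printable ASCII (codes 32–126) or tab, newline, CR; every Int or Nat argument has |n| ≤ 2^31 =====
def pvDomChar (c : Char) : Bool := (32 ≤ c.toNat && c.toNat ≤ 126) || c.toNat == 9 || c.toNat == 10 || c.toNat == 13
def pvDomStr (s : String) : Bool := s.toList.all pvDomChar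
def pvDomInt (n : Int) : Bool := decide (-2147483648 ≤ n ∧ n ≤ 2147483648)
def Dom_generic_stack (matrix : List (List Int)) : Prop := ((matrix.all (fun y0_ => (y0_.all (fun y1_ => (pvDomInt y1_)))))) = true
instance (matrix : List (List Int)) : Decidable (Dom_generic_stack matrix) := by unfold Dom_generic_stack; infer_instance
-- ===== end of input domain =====

-- B replaces A's cursor-indexed writes into a preallocated 4x4 zero matrix by a per-row
-- stable sort with key (x == 0), which pushes zeros right and keeps nonzero tiles in order.

-- ===== PORT A =====
-- inner loop of A for row i: writes matrix[i][j] (j in range(4)) into a zero row at fill_position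
def pvRowA (row : List Int) : List Int :=
  ((PySem.List.pyRange 0 4 1).foldl
    (fun (st : List Int × Int) j =>
      let v := PySem.List.pyGetD row j 0
      if v ≠ 0 then (PySem.List.pySetD st.1 st.2 v, st.2 + 1) else st)
    ([0, 0, 0, 0], 0)).1

def generic_stack (matrix : List (List Int)) : List (List Int) :=
  -- temp_matrix rows are independent: row i of the result is A's inner loop on matrix[i]
  (PySem.List.pyRange 0 4 1).map (fun i => pvRowA (PySem.List.pyGetD matrix i []))

-- ===== PORT B =====
def generic_stack_alt (matrix : List (List Int)) : List (List Int) :=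
  (PySem.List.pyRange 0 4 1).map (fun i =>
    PySem.List.sorted
      ((PySem.List.pyRange 0 4 1).map (fun j =>
        PySem.List.pyGetD (PySem.List.pyGetD matrix i []) j 0))
      (fun x => decide (x = 0)) false)

-- ===== PRECONDITION & SPEC =====
-- A indexes matrix[i][j] for i,j in range(4): it raises IndexError unless there are at
-- least 4 rows and each of the first 4 rows has at least 4 entries.
def Pre_generic_stack (matrix : List (List Int)) : Prop :=
  4 ≤ matrix.length ∧ ∀ row ∈ matrix.take 4, 4 ≤ row.length
instance (matrix : List (List Int)) : Decidable (Pre_generic_stack matrix) := by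
  unfold Pre_generic_stack; infer_instance

def pvWitness_generic_stack : List (List Int) :=
  [[2, 0, 2, 4], [0, 0, 4, 0], [8, 8, 0, 2], [0, 2, 0, 0]]

def Spec_generic_stack (matrix : List (List Int)) (out : List (List Int)) : Prop := out = generic_stack_alt matrix
instance (matrix : List (List Int)) (out : List (List Int)) : Decidable (Spec_generic_stack matrix out) := by unfold Spec_generic_stack; infer_instance

-- ===== CLAIM (what is proved, stated in full; the proofs are below) =====
def Claim_equal_generic_stack : Prop := ∀ (matrix : List (List Int)), Dom_generic_stack matrix → Pre_generic_stack matrix → Spec_generic_stack matrix (generic_stack matrix)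

-- ===== LEMMAS AND PROOFS =====

set_option maxHeartbeats 1000000 in
-- one row: A's fill-cursor pass over the first 4 entries equals the stable sort by (x == 0)
lemma pvRowA_eq_sorted (a b c d : Int) (t : List Int) :
    pvRowA (a :: b :: c :: d :: t)
      = PySem.List.sorted [a, b, c, d] (fun x => decide (x = 0)) false := by
  have e0 : PySem.List.pyGetD (a :: b :: c :: d :: t) (0 : Int) 0 = a := by simp [pysem]
  have e1 : PySem.List.pyGetD (a :: b :: c :: d :: t) (1 : Int) 0 = b := by simp [pysem]
  have e2 : PySem.List.pyGetD (a :: b :: c :: d :: t) (2 : Int) 0 = c := by simp [pysem]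
  have e3 : PySem.List.pyGetD (a :: b :: c :: d :: t) (3 : Int) 0 = d := by simp [pysem]
  rw [pvRowA, show PySem.List.pyRange 0 4 1 = [0, 1, 2, 3] from by decide]
  simp only [List.foldl_cons, List.foldl_nil, e0, e1, e2, e3]
  by_cases ha : a = 0 <;> by_cases hb : b = 0 <;> by_cases hc : c = 0 <;> by_cases hd : d = 0 <;>
    simp [PySem.List.pySetD, PySem.List.pySet?, PySem.List.pyIdx?,
      PySem.List.sorted_eq_foldl_insertBy, PySem.List.insertBy, Bool.lt_iff, ha, hb, hc, hd]

lemma pvRow_full (r : List Int) (h : 4 ≤ r.length) :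
    pvRowA r
      = PySem.List.sorted ((PySem.List.pyRange 0 4 1).map (fun j => PySem.List.pyGetD r j 0))
          (fun x => decide (x = 0)) false := by
  match r, h with
  | a :: b :: c :: d :: t, _ =>
    have e0 : PySem.List.pyGetD (a :: b :: c :: d :: t) (0 : Int) 0 = a := by simp [pysem]
    have e1 : PySem.List.pyGetD (a :: b :: c :: d :: t) (1 : Int) 0 = b := by simp [pysem]
    have e2 : PySem.List.pyGetD (a :: b :: c :: d :: t) (2 : Int) 0 = c := by simp [pysem]
    have e3 : PySem.List.pyGetD (a :: b :: c :: d :: t) (3 : Int) 0 = d := by simp [pysem]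
    rw [show PySem.List.pyRange 0 4 1 = [0, 1, 2, 3] from by decide]
    simp only [List.map_cons, List.map_nil, e0, e1, e2, e3]
    exact pvRowA_eq_sorted a b c d t

theorem generic_stack_spec : Claim_equal_generic_stack := by
  intro matrix _ hpre
  obtain ⟨hlen, hrows⟩ := hpre
  match matrix, hlen with
  | r0 :: r1 :: r2 :: r3 :: rest, _ =>
    have h0 := hrows r0 (by simp)
    have h1 := hrows r1 (by simp)
    have h2 := hrows r2 (by simp)
    have h3 := hrows r3 (by simp)
    unfold Spec_generic_stack generic_stack generic_stack_alt
    rw [show PySem.List.pyRange 0 4 1 = [0, 1, 2, 3] from by decide]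
    have p0 : PySem.List.pyGetD (r0 :: r1 :: r2 :: r3 :: rest) (0 : Int) [] = r0 := by simp [pysem]
    have p1 : PySem.List.pyGetD (r0 :: r1 :: r2 :: r3 :: rest) (1 : Int) [] = r1 := by simp [pysem]
    have p2 : PySem.List.pyGetD (r0 :: r1 :: r2 :: r3 :: rest) (2 : Int) [] = r2 := by simp [pysem]
    have p3 : PySem.List.pyGetD (r0 :: r1 :: r2 :: r3 :: rest) (3 : Int) [] = r3 := by simp [pysem]
    simp only [List.map_cons, List.map_nil, p0, p1, p2, p3,
      pvRow_full r0 h0, pvRow_full r1 h1, pvRow_full r2 h2, pvRow_full r3 h3,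
      show PySem.List.pyRange 0 4 1 = [0, 1, 2, 3] from by decide]
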